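-- pv_equiv track=rewrite | github.com/gabrielvtan/ByteAcademy-FullStack | Phase1/Week1/Python/1.3_4-Read-McNugget-Matrix-Hanoi/2-mcnugget-numbers/mcnugget.py | McNugg
-- ===== SOURCE A (Python) =====
-- def McNugg(x):
--     McNugg = [0]
--     i = 1
--     Non_McNugg = []
--     while i <= x:
--         if (i-6) in McNugg or (i-9) in McNugg or (i-20) in McNugg:
--             McNugg.append(i)
--             i += 1
--         else:
--             i += 1
--     for num in range(0, x):
--         if num not in McNugg:
--             Non_McNugg.append(num)
--     return Non_McNugg
-- ===== SOURCE B (Python) =====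
-- # Closed form: by the Chicken McNugget theorem the largest number not representable
-- # as 6a+9b+20c is 43; the non-representable numbers form this fixed 22-element list.
-- _NON_MCNUGGET = (1, 2, 3, 4, 5, 7, 8, 10, 11, 13, 14, 16, 17, 19,
--                  22, 23, 25, 28, 31, 34, 37, 43)
--
-- def McNugg(x):
--     return [n for n in _NON_MCNUGGET if n < x]
-- ===== Notes on version B (the rewrite author's own statement) =====
-- stated objective: faster
-- what changed: Replaces the incremental reachability loop over range(1,x+1) with list-membership tests by the closed form: the non-representable numbers for coins 6,9,20 are the fixed 22 values below the Frobenius number 43, so B just filters that constant list by n < x.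
import Mathlib
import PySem

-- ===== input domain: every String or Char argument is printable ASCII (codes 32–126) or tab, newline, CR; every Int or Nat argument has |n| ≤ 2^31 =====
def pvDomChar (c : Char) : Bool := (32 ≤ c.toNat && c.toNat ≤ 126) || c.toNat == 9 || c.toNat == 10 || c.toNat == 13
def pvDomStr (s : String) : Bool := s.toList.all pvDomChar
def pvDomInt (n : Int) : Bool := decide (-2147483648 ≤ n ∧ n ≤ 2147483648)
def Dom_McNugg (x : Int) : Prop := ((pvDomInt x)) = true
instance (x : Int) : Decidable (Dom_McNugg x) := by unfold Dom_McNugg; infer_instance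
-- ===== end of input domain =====

-- B replaces A's incremental reachability loop by the closed form: the non-representable
-- numbers for 6/9/20 are the fixed 22 values below the Frobenius number 43 (objective: faster).

-- ===== PORT A =====
-- the while loop: while i <= x: if (i-6) in McNugg or (i-9) in McNugg or (i-20) in McNugg: append i; i += 1
def mcLoopA (x : Int) (l : List Int) (i : Int) : List Int :=
  if _h : i ≤ x then
    if l.contains (i - 6) || l.contains (i - 9) || l.contains (i - 20) then
      mcLoopA x (l ++ [i]) (i + 1)
    else
      mcLoopA x l (i + 1)
  else l
termination_by (x + 1 - i).toNat
decreasing_by all_goals omega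

def McNugg (x : Int) : List Int :=
  let mc := mcLoopA x [0] 1
  (PySem.List.pyRange 0 x 1).foldl
    (fun acc num => if !(mc.contains num) then acc ++ [num] else acc) []

-- ===== PORT B =====
def nonMcNuggList : List Int :=
  [1, 2, 3, 4, 5, 7, 8, 10, 11, 13, 14, 16, 17, 19, 22, 23, 25, 28, 31, 34, 37, 43]

def McNugg_alt (x : Int) : List Int :=
  nonMcNuggList.filter (fun n => n < x)

-- ===== PRECONDITION & SPEC =====
def Spec_McNugg (x : Int) (out : List Int) : Prop := out = McNugg_alt x
instance (x : Int) (out : List Int) : Decidable (Spec_McNugg x out) := by unfold Spec_McNugg; infer_instance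

-- ===== CLAIM (what is proved, stated in full; the proofs are below) =====
def Claim_equal_McNugg : Prop := ∀ (x : Int), Dom_McNugg x → Spec_McNugg x (McNugg x)

-- ===== LEMMAS AND PROOFS =====

-- n is a McNugget number: a non-negative combination of 6, 9 and 20
def RepMc (n : Int) : Prop := ∃ a b c : ℕ, n = 6 * a + 9 * b + 20 * c

lemma RepMc.nonneg {n : Int} (h : RepMc n) : 0 ≤ n := by
  obtain ⟨a, b, c, rfl⟩ := h; positivity

lemma rep_zero : RepMc 0 := ⟨0, 0, 0, by norm_num⟩

lemma rep_step {i : Int} (h : 1 ≤ i) :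
    RepMc i ↔ RepMc (i - 6) ∨ RepMc (i - 9) ∨ RepMc (i - 20) := by
  constructor
  · rintro ⟨a, b, c, rfl⟩
    rcases Nat.eq_zero_or_pos a with ha | ha
    · rcases Nat.eq_zero_or_pos b with hb | hb
      · rcases Nat.eq_zero_or_pos c with hc | hc
        · subst ha; subst hb; subst hc; simp at h
        · exact Or.inr (Or.inr ⟨a, b, c - 1, by omega⟩)
      · exact Or.inr (Or.inl ⟨a, b - 1, c, by omega⟩)
    · exact Or.inl ⟨a - 1, b, c, by omega⟩
  · rintro (⟨a, b, c, hh⟩ | ⟨a, b, c, hh⟩ | ⟨a, b, c, hh⟩)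
    · exact ⟨a + 1, b, c, by omega⟩
    · exact ⟨a, b + 1, c, by omega⟩
    · exact ⟨a, b, c + 1, by omega⟩

-- characterisation of the while-loop list of A
lemma mcLoopA_mem (x : Int) :
    ∀ l i, 1 ≤ i → (∀ n : Int, n ∈ l ↔ 0 ≤ n ∧ n < i ∧ RepMc n) →
      ∀ n : Int, n ∈ mcLoopA x l i ↔ 0 ≤ n ∧ (n < i ∨ n ≤ x) ∧ RepMc n := by
  intro l i
  induction l, i using mcLoopA.induct x with
  | case1 l i hix hcond ih =>
    intro h1 hl n
    rw [mcLoopA]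
    simp only [hix, hcond, dite_true, if_true]
    have hrep : RepMc i := by
      rw [rep_step h1]
      simp only [Bool.or_eq_true, List.contains_iff_mem] at hcond
      rcases hcond with (h | h) | h <;>
      · rw [hl] at h; tauto
    rw [ih (by omega) (by
      intro m
      simp only [List.mem_append, List.mem_singleton, hl]
      constructor
      · rintro (⟨hm0, hmi, hmr⟩ | rfl)
        · exact ⟨hm0, by omega, hmr⟩
        · exact ⟨by omega, by omega, hrep⟩
      · rintro ⟨hm0, hmi, hmr⟩
        by_cases hmi' : m < i
        · exact Or.inl ⟨hm0, hmi', hmr⟩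
        · exact Or.inr (by omega))]
    constructor <;> rintro ⟨h0, hh, h2⟩ <;> exact ⟨h0, by omega, h2⟩
  | case2 l i hix hcond ih =>
    intro h1 hl n
    rw [mcLoopA]
    simp only [hix, hcond, dite_true, Bool.false_eq_true, if_false]
    have hrep : ¬ RepMc i := by
      rw [rep_step h1]
      simp only [Bool.or_eq_true, List.contains_iff_mem] at hcond
      simp only [not_or] at hcond
      rintro (h | h | h)
      · exact hcond.1.1 ((hl _).mpr ⟨h.nonneg, by omega, h⟩)
      · exact hcond.1.2 ((hl _).mpr ⟨h.nonneg, by omega, h⟩)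
      · exact hcond.2 ((hl _).mpr ⟨h.nonneg, by omega, h⟩)
    rw [ih (by omega) (by
      intro m
      rw [hl]
      constructor
      · rintro ⟨hm0, hmi, hmr⟩; exact ⟨hm0, by omega, hmr⟩
      · rintro ⟨hm0, hmi, hmr⟩
        refine ⟨hm0, ?_, hmr⟩
        rcases eq_or_lt_of_le (by omega : m ≤ i) with rfl | h
        · exact absurd hmr hrep
        · exact h)]
    constructor <;> rintro ⟨h0, hh, h2⟩ <;> exact ⟨h0, by omega, h2⟩
  | case3 l i hix =>
    intro h1 hl n
    rw [mcLoopA]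
    simp only [hix, dite_false]
    rw [hl]
    constructor <;> rintro ⟨h0, hh, h2⟩ <;> exact ⟨h0, by omega, h2⟩

-- every integer ≥ 44 is representable
lemma rep_ge_44 (n : Int) (h : 44 ≤ n) : RepMc n := by
  obtain ⟨m, rfl⟩ : ∃ m : ℕ, n = 44 + m := ⟨(n - 44).toNat, by omega⟩
  clear h
  induction m using Nat.strong_induction_on with
  | _ m ih =>
    by_cases hm : m < 6
    · interval_cases m
      · exact ⟨4, 0, 1, by norm_num⟩
      · exact ⟨0, 5, 0, by norm_num⟩
      · exact ⟨1, 0, 2, by norm_num⟩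
      · exact ⟨3, 1, 1, by norm_num⟩
      · exact ⟨8, 0, 0, by norm_num⟩
      · exact ⟨0, 1, 2, by norm_num⟩
    · obtain ⟨a, b, c, hh⟩ := ih (m - 6) (by omega)
      exact ⟨a + 1, b, c, by omega⟩

-- below 44 representability is a bounded search
lemma rep_iff_bounded (n : Int) (h : n < 44) :
    RepMc n ↔ ∃ a < 8, ∃ b < 5, ∃ c < 3, n = 6 * (a : ℕ) + 9 * (b : ℕ) + 20 * (c : ℕ) := by
  constructor
  · rintro ⟨a, b, c, rfl⟩
    exact ⟨a, by omega, b, by omega, c, by omega, rfl⟩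
  · rintro ⟨a, -, b, -, c, -, rfl⟩
    exact ⟨a, b, c, rfl⟩

-- the constant list is exactly the non-representable non-negative integers
lemma mem_nonMcNuggList (n : Int) : n ∈ nonMcNuggList ↔ 0 ≤ n ∧ ¬ RepMc n := by
  by_cases h44 : 44 ≤ n
  · have hrep := rep_ge_44 n h44
    constructor
    · intro hmem
      simp only [nonMcNuggList, List.mem_cons, List.not_mem_nil, or_false] at hmem
      exfalso; omega
    · rintro ⟨-, hn⟩; exact absurd hrep hn
  · by_cases h0 : 0 ≤ n
    · push_cast at h44
      have h44' : n < 44 := by omega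
      interval_cases n <;>
        rw [rep_iff_bounded _ (by norm_num)] <;> decide
    · constructor
      · intro hmem
        simp only [nonMcNuggList, List.mem_cons, List.not_mem_nil, or_false] at hmem
        exfalso; omega
      · rintro ⟨hn, -⟩; exfalso; omega

-- two strictly increasing integer lists with the same members are equal
lemma eq_of_pairwise_lt_of_mem_iff :
    ∀ {l1 l2 : List Int}, l1.Pairwise (· < ·) → l2.Pairwise (· < ·) →
      (∀ n, n ∈ l1 ↔ n ∈ l2) → l1 = l2 := by
  intro l1
  induction l1 with
  | nil =>
    intro l2 _ _ hmem
    cases l2 with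
    | nil => rfl
    | cons b t => exact absurd ((hmem b).mpr (List.mem_cons_self)) (List.not_mem_nil)
  | cons a t1 ih =>
    intro l2 h1 h2 hmem
    cases l2 with
    | nil => exact absurd ((hmem a).mp (List.mem_cons_self)) (List.not_mem_nil)
    | cons b t2 =>
      have hab : a = b := by
        rcases List.mem_cons.mp ((hmem a).mp (List.mem_cons_self)) with h | h
        · exact h
        · rcases List.mem_cons.mp ((hmem b).mpr (List.mem_cons_self)) with h' | h'
          · exact h'.symm
          · have hba := (List.pairwise_cons.mp h2).1 a h
            have hab := (List.pairwise_cons.mp h1).1 b h'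
            omega
      subst hab
      have htail : ∀ n, n ∈ t1 ↔ n ∈ t2 := by
        intro n
        constructor
        · intro hn
          have hlt := (List.pairwise_cons.mp h1).1 n hn
          rcases List.mem_cons.mp ((hmem n).mp (List.mem_cons_of_mem _ hn)) with h | h
          · omega
          · exact h
        · intro hn
          have hlt := (List.pairwise_cons.mp h2).1 n hn
          rcases List.mem_cons.mp ((hmem n).mpr (List.mem_cons_of_mem _ hn)) with h | h
          · omega
          · exact h
      rw [ih (List.pairwise_cons.mp h1).2 (List.pairwise_cons.mp h2).2 htail]

-- ===== VERDICT (by name: the statement is the Claim_ definition above) =====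
theorem McNugg_spec : Claim_equal_McNugg := by
  intro x _
  unfold Spec_McNugg McNugg McNugg_alt
  simp only []
  rw [PySem.List.foldl_append_if_eq_filter]
  simp only [List.nil_append]
  apply eq_of_pairwise_lt_of_mem_iff
  · exact List.Pairwise.sublist List.filter_sublist (PySem.List.pairwise_lt_pyRange_one 0 x)
  · exact List.Pairwise.sublist List.filter_sublist
      (by decide : List.Pairwise (· < ·) nonMcNuggList)
  · intro n
    simp only [List.mem_filter, PySem.List.mem_pyRange_one, Bool.not_eq_eq_eq_not,
      Bool.not_true, decide_eq_true_eq]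
    simp only [Bool.eq_false_iff, ne_eq, List.contains_iff_mem]
    rw [mcLoopA_mem x [0] 1 le_rfl (by
      intro m
      simp only [List.mem_singleton]
      constructor
      · rintro rfl; exact ⟨le_rfl, by norm_num, rep_zero⟩
      · rintro ⟨h0, h1, -⟩; omega)]
    rw [mem_nonMcNuggList]
    constructor
    · rintro ⟨⟨h0, hx⟩, hn⟩
      exact ⟨⟨h0, fun hr => hn ⟨h0, Or.inr (by omega), hr⟩⟩, hx⟩
    · rintro ⟨⟨h0, hn⟩, hx⟩
      exact ⟨⟨h0, hx⟩, fun hr => hn hr.2.2⟩
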